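-- pv_equiv track=rewrite | github.com/JojhanPerezArroyave/taller1Algoritmos | main.py | frecuenciaEstadosAnteriores
-- ===== SOURCE A (Python) =====
-- def frecuenciaEstadosAnteriores(canales: dict, estados: list) -> dict:
--     num_canales = len(canales)
--     frecuencias = {estado: [0] * num_canales for estado in estados}
--     num_tiempos = len(list(canales.values())[0])
--
--     for estado in estados:
--         for i in range(num_tiempos - 1, 0, -1):
--             if estado == "".join(canales[canal][i] for canal in canales):
--                 for j, canal in enumerate(canales):
--                     if canales[canal][i - 1] == "1":
--                         frecuencias[estado][j] += 1
--
--     return frecuencias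
-- ===== SOURCE B (Python) =====
-- def frecuenciaEstadosAnteriores(canales: dict, estados: list) -> dict:
--     num_canales = len(canales)
--     columnas = list(canales.values())
--     num_tiempos = len(columnas[0])
--     grupos = {}
--     for i in range(1, num_tiempos):
--         clave = "".join(col[i] for col in columnas)
--         acumulado = grupos.get(clave, [0] * num_canales)
--         grupos[clave] = [c + (1 if col[i - 1] == "1" else 0)
--                          for c, col in zip(acumulado, columnas)]
--     return {estado: grupos.get(estado, [0] * num_canales) for estado in estados}
-- ===== Notes on version B (the rewrite author's own statement) =====
-- stated objective: faster
-- what changed: A rescans all time steps once per estado (and bumps counters one index at a time via enumerate); B makes a single forward pass over time building a dict from each observed combined-state string to its accumulated channel-count vector, then assembles the answer with one lookup per estado.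
-- outside the precondition, e.g. on frecuenciaEstadosAnteriores({'a': '11'}, ['1', '1']): A returns {'1': [2]}, B returns {'1': [1]}
import Mathlib
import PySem

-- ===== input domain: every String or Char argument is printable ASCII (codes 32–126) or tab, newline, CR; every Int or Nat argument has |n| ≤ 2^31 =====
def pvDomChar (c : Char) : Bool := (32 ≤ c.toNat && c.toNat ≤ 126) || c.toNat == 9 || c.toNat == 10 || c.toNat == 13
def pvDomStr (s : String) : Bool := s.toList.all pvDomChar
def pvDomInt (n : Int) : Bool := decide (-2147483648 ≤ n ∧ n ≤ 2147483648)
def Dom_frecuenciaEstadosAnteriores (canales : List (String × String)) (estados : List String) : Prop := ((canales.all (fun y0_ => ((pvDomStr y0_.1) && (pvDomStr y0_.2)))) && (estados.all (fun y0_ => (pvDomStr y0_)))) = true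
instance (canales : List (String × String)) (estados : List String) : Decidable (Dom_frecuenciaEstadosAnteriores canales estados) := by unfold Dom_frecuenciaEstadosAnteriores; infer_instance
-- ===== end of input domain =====

-- B replaces A's per-estado rescan of all time steps by a single forward pass over time that builds a
-- dict combined-state → channel-count vector, assembled afterwards with one lookup per estado (faster).

-- ===== PORT A =====
def frecuenciaEstadosAnteriores (canales : List (String × String)) (estados : List String) : List (String × List Int) :=
  let num_canales : Int := (canales.length : Int)
  let frecuencias : PySem.Dict String (List Int) :=
    estados.foldl (fun d estado => d.insert estado (List.replicate num_canales.toNat 0)) PySem.Dict.empty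
  -- len(list(canales.values())[0]); pyGet? = none is the IndexError on empty canales, excluded by Pre_
  let num_tiempos : Int := PySem.Str.len ((PySem.List.pyGet? (canales.map Prod.snd) 0).getD "")
  -- 'for canal in canales' with lookups canales[canal] iterates the pairs directly (keys are distinct: Pre_);
  -- string '==' is compared as char lists; pyGet? = none is the IndexError on a short channel string (Pre_)
  let final : PySem.Dict String (List Int) :=
    estados.foldl (fun d estado =>
      (PySem.List.pyRange (num_tiempos - 1) 0 (-1)).foldl (fun d i =>
        if estado.toList == canales.map (fun c => (PySem.Str.pyGet? c.2 i).getD ' ') then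
          (PySem.List.enumerate canales).foldl (fun d jc =>
            if (PySem.Str.pyGet? jc.2.2 (i - 1)).getD ' ' == '1' then
              d.modify estado [] (fun v => PySem.List.pySetD v jc.1 (PySem.List.pyGetD v jc.1 0 + 1))
            else d) d
        else d) d) frecuencias
  final.items

-- ===== PORT B =====
def frecuenciaEstadosAnteriores_alt (canales : List (String × String)) (estados : List String) : List (String × List Int) :=
  let num_canales : Int := (canales.length : Int)
  let columnas : List String := canales.map Prod.snd
  let num_tiempos : Int := PySem.Str.len ((PySem.List.pyGet? columnas 0).getD "")
  let grupos : PySem.Dict (List Char) (List Int) :=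
    (PySem.List.pyRange 1 num_tiempos 1).foldl (fun g i =>
      let clave : List Char := columnas.map (fun col => (PySem.Str.pyGet? col i).getD ' ')
      let acumulado : List Int := g.getD clave (List.replicate num_canales.toNat 0)
      g.insert clave (List.zipWith
        (fun c col => c + (if (PySem.Str.pyGet? col (i - 1)).getD ' ' == '1' then (1:Int) else 0))
        acumulado columnas)) PySem.Dict.empty
  (estados.foldl (fun d estado =>
    d.insert estado (grupos.getD estado.toList (List.replicate num_canales.toNat 0)))
    PySem.Dict.empty).items

-- ===== PRECONDITION & SPEC =====
-- Pre_ excludes: empty canales, and channel strings shorter than the first one when there are ≥ 2 time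
-- steps (Python A raises IndexError on both); association lists with duplicate canales keys (a Python dict
-- cannot carry them); and estados with duplicate entries, on which A's re-iteration over estados
-- accidentally multiplies a state's counts by its multiplicity while B counts each observed state once.
def Pre_frecuenciaEstadosAnteriores (canales : List (String × String)) (estados : List String) : Prop :=
  canales ≠ [] ∧ (canales.map Prod.fst).Nodup ∧ estados.Nodup ∧
  (PySem.Str.len ((PySem.List.pyGet? (canales.map Prod.snd) 0).getD "") ≤ 1 ∨
    ∀ p ∈ canales,
      PySem.Str.len ((PySem.List.pyGet? (canales.map Prod.snd) 0).getD "") ≤ PySem.Str.len p.2)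
instance (canales : List (String × String)) (estados : List String) : Decidable (Pre_frecuenciaEstadosAnteriores canales estados) := by unfold Pre_frecuenciaEstadosAnteriores; infer_instance

def pvWitness_frecuenciaEstadosAnteriores : (List (String × String)) × List String :=
  ([("a", "101"), ("b", "011")], ["11", "01"])

def Spec_frecuenciaEstadosAnteriores (canales : List (String × String)) (estados : List String) (out : List (String × List Int)) : Prop := out = frecuenciaEstadosAnteriores_alt canales estados
instance (canales : List (String × String)) (estados : List String) (out : List (String × List Int)) : Decidable (Spec_frecuenciaEstadosAnteriores canales estados out) := by unfold Spec_frecuenciaEstadosAnteriores; infer_instance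

-- ===== CLAIM (what is proved, stated in full; the proofs are below) =====
def Claim_equal_frecuenciaEstadosAnteriores : Prop := ∀ (canales : List (String × String)) (estados : List String), Dom_frecuenciaEstadosAnteriores canales estados → Pre_frecuenciaEstadosAnteriores canales estados → Spec_frecuenciaEstadosAnteriores canales estados (frecuenciaEstadosAnteriores canales estados)

-- ===== LEMMAS AND PROOFS =====

-- the per-time increment vector: one entry per channel, 1 iff the channel was "1" at time i-1
def pvInc (canales : List (String × String)) (i : Int) : List Int :=
  canales.map (fun c => if (PySem.Str.pyGet? c.2 (i - 1)).getD ' ' == '1' then (1:Int) else 0)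

-- A's in-place '+= 1' sweep over enumerate(canales)
def pvBump (canales : List (String × String)) (i : Int) (v : List Int) : List Int :=
  (PySem.List.enumerate canales).foldl (fun v jc =>
    if (PySem.Str.pyGet? jc.2.2 (i - 1)).getD ' ' == '1' then
      PySem.List.pySetD v jc.1 (PySem.List.pyGetD v jc.1 0 + 1)
    else v) v

theorem pv_zadd_comm (v a b : List Int) :
    List.zipWith (· + ·) (List.zipWith (· + ·) v a) b
      = List.zipWith (· + ·) (List.zipWith (· + ·) v b) a := by
  apply List.ext_getElem
  · simp [List.length_zipWith]; omega
  · intro i h1 h2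
    simp [List.getElem_zipWith]; ring

theorem pv_setD_natCast (v : List Int) (s : Nat) (x : Int) (h : s < v.length) :
    PySem.List.pySetD v (s:Int) x = v.set s x := by
  simp [PySem.List.pySetD, PySem.List.pySet?, PySem.List.pyIdx?, h]

theorem pv_enum_fold (P : (String × String) → Bool) (cs : List (String × String)) (s : Nat)
    (v : List Int) (h : s + cs.length ≤ v.length) :
    (PySem.List.enumerate cs (s : Int)).foldl
        (fun v jc => if P jc.2 then PySem.List.pySetD v jc.1 (PySem.List.pyGetD v jc.1 0 + 1) else v) v
      = v.take s ++ List.zipWith (· + ·) (v.drop s) (cs.map fun c => if P c then (1:Int) else 0)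
          ++ v.drop (s + cs.length) := by
  induction cs generalizing s v with
  | nil => simp [PySem.List.enumerate]
  | cons c cs ih =>
    rw [PySem.List.enumerate_cons]
    have hs : s < v.length := by simp at h; omega
    have hdrop : v.drop s = v[s] :: v.drop (s + 1) := List.drop_eq_getElem_cons hs
    by_cases hp : P c
    · have hget : PySem.List.pyGetD v (s : Int) 0 = v[s] := by
        simp [PySem.List.pyGetD_natCast, List.getElem?_eq_getElem hs]
      simp only [List.foldl_cons, hp, if_true]
      rw [hget, pv_setD_natCast v s _ hs]
      have hlen : (v.set s (v[s] + 1)).length = v.length := by simp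
      have hcast : ((s:Int) + 1) = ((s + 1 : Nat) : Int) := by push_cast; ring
      rw [hcast, ih (s + 1) _ (by simp [hlen]; simp at h; omega)]
      have h1 : (v.set s (v[s] + 1)).take (s+1) = v.take s ++ [v[s] + 1] := by
        rw [List.take_add_one]
        congr 1
        · rw [List.take_set]; exact List.set_eq_of_length_le (by simp)
        · simp [hs]
      have h2 : (v.set s (v[s] + 1)).drop (s+1) = v.drop (s+1) := by
        rw [List.drop_set]
        simp
      rw [h1, h2]
      simp only [List.map_cons, hdrop, List.zipWith_cons_cons]
      have : s + (c :: cs).length = (s+1) + cs.length := by simp; omega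
      rw [this]
      simp only [List.append_assoc, List.cons_append, List.drop_set]
      simp only [hp, if_true]
      rw [if_pos (show s < s + 1 + cs.length by omega)]
      simp
    · simp only [List.foldl_cons, hp, Bool.false_eq_true, if_false]
      have hcast : ((s:Int) + 1) = ((s + 1 : Nat) : Int) := by push_cast; ring
      rw [hcast, ih (s + 1) _ (by simp at h ⊢; omega)]
      have h1 : v.take (s+1) = v.take s ++ [v[s]] := by
        rw [List.take_add_one]
        simp [List.getElem?_eq_getElem hs]
      rw [h1]
      simp only [List.map_cons, hdrop, List.zipWith_cons_cons]
      have : s + (c :: cs).length = (s+1) + cs.length := by simp; omega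
      rw [this]
      simp only [hp, Bool.false_eq_true, if_false, add_zero]
      simp only [List.append_assoc, List.cons_append, List.nil_append]

theorem pv_range_desc (T : Int) :
    PySem.List.pyRange (T - 1) 0 (-1) = (PySem.List.pyRange 1 T 1).reverse := by
  simp only [PySem.List.pyRange]
  norm_num
  apply List.ext_getElem
  · simp
  · intro j h1 h2
    by_cases hT : 1 < T <;>
      simp only [hT, if_true, if_false, List.getElem_map, List.getElem_range,
        List.getElem_reverse, List.length_map, List.length_range] at h1 ⊢ <;>
      push_cast <;> omega

theorem pv_getD_fold_insert (K : Int → List Char) (I : Int → List Int) (z : List Int)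
    (li : List Int) (g : PySem.Dict (List Char) (List Int)) (k : List Char) :
    (li.foldl (fun g i => g.insert (K i) (List.zipWith (· + ·) (g.getD (K i) z) (I i))) g).getD k z
      = li.foldl (fun v i => if k == K i then List.zipWith (· + ·) v (I i) else v) (g.getD k z) := by
  induction li generalizing g with
  | nil => rfl
  | cons i li ih =>
    simp only [List.foldl_cons, ih]
    congr 1
    rw [PySem.Dict.getD_insert]
    by_cases h : k = K i
    · subst h; simp
    · simp [h]

theorem pv_fold_rev (C : Int → Bool) (I : Int → List Int) (l : List Int) (v : List Int) :
    l.reverse.foldl (fun v i => if C i then List.zipWith (· + ·) v (I i) else v) v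
      = l.foldl (fun v i => if C i then List.zipWith (· + ·) v (I i) else v) v := by
  have hstep : ∀ (w : List Int) (a b : Int),
      (if C b then List.zipWith (· + ·) (if C a then List.zipWith (· + ·) w (I a) else w) (I b)
        else (if C a then List.zipWith (· + ·) w (I a) else w))
      = (if C a then List.zipWith (· + ·) (if C b then List.zipWith (· + ·) w (I b) else w) (I a)
        else (if C b then List.zipWith (· + ·) w (I b) else w)) := by
    intro w a b
    by_cases ha : C a <;> by_cases hb : C b <;> simp [ha, hb, pv_zadd_comm]
  rw [List.foldl_reverse]
  exact (List.foldl_eq_foldr' (fun w a b => hstep w a b) v l).symm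

theorem pv_inner_getD_self {A : Type} (li : List A) (C : A → Bool) (G : A → List Int → List Int)
    (e : String) (d : PySem.Dict String (List Int)) :
    (li.foldl (fun d x => if C x then d.modify e [] (G x) else d) d).getD e []
      = li.foldl (fun v x => if C x then G x v else v) (d.getD e []) := by
  induction li generalizing d with
  | nil => rfl
  | cons x li ih =>
    simp only [List.foldl_cons]
    by_cases h : C x
    · simp only [h, if_true, ih, PySem.Dict.getD_modify_self]
    · simp only [h, Bool.false_eq_true, if_false, ih]

theorem pv_inner_getD_ne {A : Type} (li : List A) (C : A → Bool) (G : A → List Int → List Int)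
    (e e' : String) (hne : e' ≠ e) (d : PySem.Dict String (List Int)) :
    (li.foldl (fun d x => if C x then d.modify e [] (G x) else d) d).getD e' []
      = d.getD e' [] := by
  induction li generalizing d with
  | nil => rfl
  | cons x li ih =>
    simp only [List.foldl_cons]
    by_cases h : C x
    · simp only [h, if_true, ih, PySem.Dict.getD_modify_of_ne _ _ _ hne]
    · simp only [h, Bool.false_eq_true, if_false, ih]

theorem pv_inner_keys {A : Type} (li : List A) (C : A → Bool) (G : A → List Int → List Int)
    (e : String) (d : PySem.Dict String (List Int)) (h : e ∈ d.keys) :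
    (li.foldl (fun d x => if C x then d.modify e [] (G x) else d) d).keys = d.keys := by
  induction li generalizing d with
  | nil => rfl
  | cons x li ih =>
    simp only [List.foldl_cons]
    by_cases hc : C x
    · have hcont : d.contains e = true := (PySem.Dict.contains_iff_mem_keys d e).mpr h
      have hk : (d.modify e [] (G x)).keys = d.keys := by
        rw [PySem.Dict.keys_modify, PySem.Dict.keys_insert_of_contains _ _ hcont]
      rw [if_pos hc, ih _ (by rw [hk]; exact h), hk]
    · simp only [hc, Bool.false_eq_true, if_false, ih _ h]

-- the dict transformer A applies at time i for a fixed estado e (the enumerate sweep of modifies)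
def pvInnerA (cs : List (String × String)) (e : String) (i : Int)
    (d : PySem.Dict String (List Int)) : PySem.Dict String (List Int) :=
  (PySem.List.enumerate cs).foldl (fun d jc =>
    if (PySem.Str.pyGet? jc.2.2 (i - 1)).getD ' ' == '1' then
      d.modify e [] (fun v => PySem.List.pySetD v jc.1 (PySem.List.pyGetD v jc.1 0 + 1))
    else d) d

theorem pv_innerA_getD_self (cs : List (String × String)) (e : String) (i : Int)
    (d : PySem.Dict String (List Int)) :
    (pvInnerA cs e i d).getD e [] = pvBump cs i (d.getD e []) :=
  pv_inner_getD_self (PySem.List.enumerate cs)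
    (fun jc => (PySem.Str.pyGet? jc.2.2 (i - 1)).getD ' ' == '1')
    (fun jc v => PySem.List.pySetD v jc.1 (PySem.List.pyGetD v jc.1 0 + 1)) e d

theorem pv_innerA_getD_ne (cs : List (String × String)) (e e' : String) (hne : e' ≠ e) (i : Int)
    (d : PySem.Dict String (List Int)) :
    (pvInnerA cs e i d).getD e' [] = d.getD e' [] :=
  pv_inner_getD_ne (PySem.List.enumerate cs)
    (fun jc => (PySem.Str.pyGet? jc.2.2 (i - 1)).getD ' ' == '1')
    (fun jc v => PySem.List.pySetD v jc.1 (PySem.List.pyGetD v jc.1 0 + 1)) e e' hne d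

theorem pv_innerA_keys (cs : List (String × String)) (e : String) (i : Int)
    (d : PySem.Dict String (List Int)) (h : e ∈ d.keys) :
    (pvInnerA cs e i d).keys = d.keys :=
  pv_inner_keys (PySem.List.enumerate cs)
    (fun jc => (PySem.Str.pyGet? jc.2.2 (i - 1)).getD ' ' == '1')
    (fun jc v => PySem.List.pySetD v jc.1 (PySem.List.pyGetD v jc.1 0 + 1)) e d h

theorem pv_timeA_getD_self (cs : List (String × String)) (Cond : Int → Bool) (li : List Int)
    (e : String) (d : PySem.Dict String (List Int)) :
    (li.foldl (fun d i => if Cond i then pvInnerA cs e i d else d) d).getD e []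
      = li.foldl (fun v i => if Cond i then pvBump cs i v else v) (d.getD e []) := by
  induction li generalizing d with
  | nil => rfl
  | cons i li ih =>
    simp only [List.foldl_cons]
    by_cases h : Cond i
    · simp only [h, if_true, ih, pv_innerA_getD_self]
    · simp only [h, Bool.false_eq_true, if_false, ih]

theorem pv_timeA_getD_ne (cs : List (String × String)) (Cond : Int → Bool) (li : List Int)
    (e e' : String) (hne : e' ≠ e) (d : PySem.Dict String (List Int)) :
    (li.foldl (fun d i => if Cond i then pvInnerA cs e i d else d) d).getD e' []
      = d.getD e' [] := by
  induction li generalizing d with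
  | nil => rfl
  | cons i li ih =>
    simp only [List.foldl_cons]
    by_cases h : Cond i
    · simp only [h, if_true, ih, pv_innerA_getD_ne cs e e' hne]
    · simp only [h, Bool.false_eq_true, if_false, ih]

theorem pv_timeA_keys (cs : List (String × String)) (Cond : Int → Bool) (li : List Int)
    (e : String) (d : PySem.Dict String (List Int)) (h : e ∈ d.keys) :
    (li.foldl (fun d i => if Cond i then pvInnerA cs e i d else d) d).keys = d.keys := by
  induction li generalizing d with
  | nil => rfl
  | cons i li ih =>
    simp only [List.foldl_cons]
    by_cases hc : Cond i
    · have hk : (pvInnerA cs e i d).keys = d.keys := pv_innerA_keys cs e i d h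
      rw [if_pos hc, ih _ (by rw [hk]; exact h), hk]
    · simp only [hc, Bool.false_eq_true, if_false, ih _ h]

theorem pv_outerA_keys (cs : List (String × String)) (Cond : String → Int → Bool) (li : List Int)
    (es : List String) (d : PySem.Dict String (List Int)) (h : ∀ e ∈ es, e ∈ d.keys) :
    (es.foldl (fun d e => li.foldl (fun d i => if Cond e i then pvInnerA cs e i d else d) d) d).keys
      = d.keys := by
  induction es generalizing d with
  | nil => rfl
  | cons a es ih =>
    simp only [List.foldl_cons]
    have hk := pv_timeA_keys cs (Cond a) li a d (h a (by simp))
    rw [ih _ (fun e he => by rw [hk]; exact h e (by simp [he])), hk]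

theorem pv_outerA_getD_not_mem (cs : List (String × String)) (Cond : String → Int → Bool)
    (li : List Int) (es : List String) (d : PySem.Dict String (List Int)) (e : String)
    (he : e ∉ es) :
    (es.foldl (fun d e => li.foldl (fun d i => if Cond e i then pvInnerA cs e i d else d) d) d).getD e []
      = d.getD e [] := by
  induction es generalizing d with
  | nil => rfl
  | cons a es ih =>
    simp only [List.foldl_cons]
    have hne : e ≠ a := fun hh => he (by simp [hh])
    rw [ih _ (fun hh => he (by simp [hh])), pv_timeA_getD_ne cs (Cond a) li a e hne d]

theorem pv_outerA_getD (cs : List (String × String)) (Cond : String → Int → Bool)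
    (li : List Int) (es : List String) (d : PySem.Dict String (List Int)) (e : String)
    (he : e ∈ es) (hnd : es.Nodup) :
    (es.foldl (fun d e => li.foldl (fun d i => if Cond e i then pvInnerA cs e i d else d) d) d).getD e []
      = li.foldl (fun v i => if Cond e i then pvBump cs i v else v) (d.getD e []) := by
  induction es generalizing d with
  | nil => cases he
  | cons a es ih =>
    simp only [List.foldl_cons]
    rcases List.nodup_cons.mp hnd with ⟨ha, hnd'⟩
    rcases List.mem_cons.mp he with rfl | hmem
    · rw [pv_outerA_getD_not_mem cs Cond li es _ e ha, pv_timeA_getD_self]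
    · have hne : e ≠ a := fun hh => ha (hh ▸ hmem)
      rw [ih _ hmem hnd', pv_timeA_getD_ne cs (Cond a) li a e hne d]

theorem pv_bump_eq (canales : List (String × String)) (i : Int) (v : List Int)
    (hv : v.length = canales.length) :
    pvBump canales i v = List.zipWith (· + ·) v (pvInc canales i) := by
  have := pv_enum_fold (fun c => (PySem.Str.pyGet? c.2 (i - 1)).getD ' ' == '1') canales 0 v
    (by omega)
  rw [pvBump, pvInc]
  norm_num at this ⊢
  rw [this]
  simp [hv]

theorem pv_fold_bump_eq (canales : List (String × String)) (C : Int → Bool) (li : List Int)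
    (v : List Int) (hv : v.length = canales.length) :
    li.foldl (fun v i => if C i then pvBump canales i v else v) v
      = li.foldl (fun v i => if C i then List.zipWith (· + ·) v (pvInc canales i) else v) v := by
  induction li generalizing v with
  | nil => rfl
  | cons i li ih =>
    simp only [List.foldl_cons]
    by_cases h : C i
    · rw [h, if_pos rfl, if_pos rfl, pv_bump_eq canales i v hv]
      exact ih _ (by simp [List.length_zipWith, hv, pvInc])
    · simp only [h, Bool.false_eq_true, if_false]
      exact ih _ hv

-- ===== VERDICT (by name: the statement is the Claim_ definition above) =====
theorem frecuenciaEstadosAnteriores_spec : Claim_equal_frecuenciaEstadosAnteriores := by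
  intro canales estados _hdom hpre
  obtain ⟨_hne, _hkeys, hnd, _hlen⟩ := hpre
  unfold Spec_frecuenciaEstadosAnteriores frecuenciaEstadosAnteriores frecuenciaEstadosAnteriores_alt
  simp only [Int.toNat_natCast, List.map_map, Function.comp_def]
  set z : List Int := List.replicate canales.length 0 with hz
  set T : Int := PySem.Str.len ((PySem.List.pyGet? (List.map Prod.snd canales) 0).getD "") with hT
  set init := List.foldl (fun d estado => d.insert estado z) PySem.Dict.empty estados with hinit
  -- recast A's inner enumerate sweep as pvInnerA (definitional)
  show (List.foldl
        (fun d estado =>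
          List.foldl
            (fun d i =>
              if (estado.toList == List.map (fun c => (PySem.Str.pyGet? c.2 i).getD ' ') canales) = true then
                pvInnerA canales estado i d
              else d)
            d (PySem.List.pyRange (T - 1) 0 (-1)))
        init estados).items =
    (List.foldl
        (fun d estado =>
          d.insert estado
            ((List.foldl
                  (fun g i =>
                    g.insert (List.map (fun x => (PySem.Str.pyGet? x.2 i).getD ' ') canales)
                      (List.zipWith
                        (fun c col => c + if ((PySem.Str.pyGet? col (i - 1)).getD ' ' == '1') = true then 1 else 0)
                        (g.getD (List.map (fun x => (PySem.Str.pyGet? x.2 i).getD ' ') canales) z)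
                        (List.map Prod.snd canales)))
                  PySem.Dict.empty (PySem.List.pyRange 1 T)).getD
              estado.toList z))
        PySem.Dict.empty estados).items
  -- normalise B's per-time update to 'zipWith (+) _ (pvInc canales i)'
  have hzip : (fun (g : PySem.Dict (List Char) (List Int)) (i : Int) =>
        g.insert (List.map (fun x => (PySem.Str.pyGet? x.2 i).getD ' ') canales)
          (List.zipWith
            (fun c col => c + if ((PySem.Str.pyGet? col (i - 1)).getD ' ' == '1') = true then 1 else 0)
            (g.getD (List.map (fun x => (PySem.Str.pyGet? x.2 i).getD ' ') canales) z)
            (List.map Prod.snd canales)))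
      = (fun (g : PySem.Dict (List Char) (List Int)) (i : Int) =>
        g.insert (List.map (fun x => (PySem.Str.pyGet? x.2 i).getD ' ') canales)
          (List.zipWith (· + ·)
            (g.getD (List.map (fun x => (PySem.Str.pyGet? x.2 i).getD ' ') canales) z)
            (pvInc canales i))) := by
    funext g i
    rw [pvInc]
    rw [List.zipWith_map_right, List.zipWith_map_right]
  rw [hzip]
  -- B's assembly loop over distinct fresh keys is a map
  rw [PySem.Dict.items_foldl_insert_fresh estados (fun e : String => e) _ PySem.Dict.empty
    (fun a _ => rfl) (by simpa using hnd)]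
  -- A's initial dict
  have hinit_items : init.items = estados.map (fun e => (e, z)) := by
    rw [hinit, PySem.Dict.items_foldl_insert_fresh estados (fun e : String => e) (fun _ => z)
      PySem.Dict.empty (fun a _ => rfl) (by simpa using hnd)]
    exact List.nil_append _
  have hinit_keys : init.keys = estados := by
    show init.items.map Prod.fst = estados
    rw [hinit_items, List.map_map]
    simp [Function.comp_def]
  set F := List.foldl
        (fun d estado =>
          List.foldl
            (fun d i =>
              if (estado.toList == List.map (fun c => (PySem.Str.pyGet? c.2 i).getD ' ') canales) = true then
                pvInnerA canales estado i d
              else d)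
            d (PySem.List.pyRange (T - 1) 0 (-1)))
        init estados with hF
  have hFkeys : F.keys = estados := by
    rw [hF, pv_outerA_keys canales
      (fun e i => e.toList == List.map (fun c => (PySem.Str.pyGet? c.2 i).getD ' ') canales)
      (PySem.List.pyRange (T - 1) 0 (-1)) estados init
      (fun e he => by rw [hinit_keys]; exact he), hinit_keys]
  rw [PySem.Dict.items_eq_map_keys F (by rw [hFkeys]; exact hnd) [], hFkeys]
  refine Eq.trans ?_ (List.nil_append _).symm
  apply List.map_congr_left
  intro e he
  have h5 := pv_outerA_getD canales
    (fun e i => e.toList == List.map (fun c => (PySem.Str.pyGet? c.2 i).getD ' ') canales)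
    (PySem.List.pyRange (T - 1) 0 (-1)) estados init e he hnd
  have h6 : init.getD e [] = z := by
    have hm : (e, z) ∈ init.items := by
      rw [hinit_items]; exact List.mem_map.mpr ⟨e, he, rfl⟩
    have hk : init.keys.Nodup := by rw [hinit_keys]; exact hnd
    exact PySem.Dict.getD_of_mem_items _ hm hk []
  rw [← hF] at h5
  rw [h5, h6]
  rw [pv_fold_bump_eq canales _ _ z (by simp [hz])]
  rw [pv_range_desc, pv_fold_rev]
  rw [pv_getD_fold_insert (fun i => List.map (fun x => (PySem.Str.pyGet? x.2 i).getD ' ') canales)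
    (pvInc canales) z (PySem.List.pyRange 1 T) PySem.Dict.empty e.toList]
  rw [PySem.Dict.getD_empty]
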